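-- pv_equiv track=rewrite | github.com/zapata-engineering/orquestra-quantum | src/orquestra/quantum/circuits/_itertools.py | expand_sample_sizes
-- ===== SOURCE A (Python) =====
-- from math import ceil
-- from typing import Dict, Iterable, Sequence, Tuple, TypeVar
--
-- T = TypeVar("T")
--
-- def _expand_sample_size(n_samples, max_sample_size):
--     multiplicities = ceil(n_samples / max_sample_size)
--     new_n_samples = (
--         multiplicities * (max_sample_size,)
--         if n_samples % max_sample_size == 0
--         else (multiplicities - 1) * (max_sample_size,) + (n_samples % max_sample_size,)
--     )
--     return new_n_samples, multiplicities
--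
-- def expand_sample_sizes(
--     circuits: Sequence[T], n_samples_per_circuit: Sequence[int], max_sample_size: int
-- ) -> Tuple[Sequence[T], Sequence[int], Sequence[int]]:
--     """Expand sample sizes for each circuit to fit maximum sample size.
--
--     Args:
--         circuits: list of circuits to be expanded
--         n_samples_per_circuit: list of sample sizes corresponding to each
--           circuit
--         max_sample_size: maximum allowable sample size
--     Returns:
--       Tuple of three sequences (new_circuits, new_sample_sizes, multiplicities):
--
--       - new_circuits: sequence of circuits containing all of the original, possibly
--         duplicated, circuits
--       - new_n_samples: list of integers of the same length as new_circuits,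
--         s.t. sum of all sample sizes corresponding to given circuit (counting
--         duplicates) is equal to the original sample size
--       - multiplicities: sequence of the same length as original sequence of
--         circuits holding information on how many times given circuit has
--         been duplicated in `new_circuits`
--     """
--     n_samples_and_multiplicities = [
--         _expand_sample_size(n_samples, max_sample_size)
--         for n_samples in n_samples_per_circuit
--     ]
--
--     new_n_samples = [
--         n for n_samples, _ in n_samples_and_multiplicities for n in n_samples
--     ]
--
--     multiplicities = [multi for _, multi in n_samples_and_multiplicities]
--     new_circuits = [
--         circuit
--         for circuit, multi in zip(circuits, multiplicities)
--         for _ in range(multi)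
--     ]
--
--     return new_circuits, new_n_samples, multiplicities
-- ===== SOURCE B (Python) =====
-- def expand_sample_sizes(circuits, n_samples_per_circuit, max_sample_size):
--     new_circuits = []
--     new_n_samples = []
--     multiplicities = []
--     for i, n in enumerate(n_samples_per_circuit):
--         q, r = divmod(n, max_sample_size)
--         if r:
--             new_n_samples += [max_sample_size] * q + [r]
--             q += 1
--         else:
--             new_n_samples += [max_sample_size] * q
--         if i < len(circuits):
--             new_circuits += [circuits[i]] * q
--         multiplicities.append(q)
--     return new_circuits, new_n_samples, multiplicities
-- ===== Notes on version B (the rewrite author's own statement) =====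
-- stated objective: simpler
-- what changed: Replaces the float-ceil helper plus three separate comprehensions by one fused integer-divmod loop that builds all three output lists in a single pass.
import Mathlib
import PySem

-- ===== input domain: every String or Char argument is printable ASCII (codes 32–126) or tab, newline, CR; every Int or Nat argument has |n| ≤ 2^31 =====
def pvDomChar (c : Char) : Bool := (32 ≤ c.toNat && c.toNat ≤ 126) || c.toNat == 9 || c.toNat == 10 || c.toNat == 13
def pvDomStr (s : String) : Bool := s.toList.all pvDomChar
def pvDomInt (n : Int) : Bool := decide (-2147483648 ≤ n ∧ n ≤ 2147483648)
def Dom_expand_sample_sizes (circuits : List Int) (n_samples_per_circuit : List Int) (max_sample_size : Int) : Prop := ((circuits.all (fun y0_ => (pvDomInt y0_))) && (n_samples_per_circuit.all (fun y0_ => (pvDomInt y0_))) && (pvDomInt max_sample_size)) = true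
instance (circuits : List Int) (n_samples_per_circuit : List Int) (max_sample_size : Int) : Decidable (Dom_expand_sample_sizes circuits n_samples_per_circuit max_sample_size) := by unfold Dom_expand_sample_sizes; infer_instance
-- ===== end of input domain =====

-- B replaces A's float-ceil helper plus three separate comprehensions by one fused
-- integer-divmod loop building all three output lists in a single pass (objective: simpler).


-- ===== PORT A =====
-- math.ceil(n / m) ported as the exact integer ceiling -((-n) // m): exact on Dom,
-- since |n|, |m| ≤ 2^31 < 2^53 makes the float quotient correctly rounded and unable
-- to cross an integer; Python's n * (x,) with negative n is the empty tuple, hence .toNat.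
def pvExpandOne (n_samples max_sample_size : Int) : List Int × Int :=
  let multiplicities : Int := -(PySem.Int.floordiv (-n_samples) max_sample_size)
  let new_n_samples : List Int :=
    if PySem.Int.mod n_samples max_sample_size = 0 then
      List.replicate multiplicities.toNat max_sample_size
    else
      List.replicate (multiplicities - 1).toNat max_sample_size ++
        [PySem.Int.mod n_samples max_sample_size]
  (new_n_samples, multiplicities)

def expand_sample_sizes (circuits : List Int) (n_samples_per_circuit : List Int) (max_sample_size : Int) : List Int × List Int × List Int :=
  let n_samples_and_multiplicities :=
    n_samples_per_circuit.map (fun n_samples => pvExpandOne n_samples max_sample_size)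
  let new_n_samples := n_samples_and_multiplicities.flatMap (fun p => p.1)
  let multiplicities := n_samples_and_multiplicities.map (fun p => p.2)
  let new_circuits :=
    (circuits.zip multiplicities).flatMap (fun p => List.replicate p.2.toNat p.1)
  (new_circuits, new_n_samples, multiplicities)

-- ===== PORT B =====
-- One fused loop over enumerate(n_samples_per_circuit); Python list * count with a
-- negative count is the empty list, hence .toNat.
def pvAltGo (circuits : List Int) (max_sample_size : Int) :
    List (Int × Int) → List Int × List Int × List Int → List Int × List Int × List Int
  | [], st => st
  | (i, n) :: rest, (nc, nn, mu) =>
      let q := PySem.Int.floordiv n max_sample_size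
      let r := PySem.Int.mod n max_sample_size
      let qnn : Int × List Int :=
        if r ≠ 0 then
          (q + 1, nn ++ (List.replicate q.toNat max_sample_size ++ [r]))
        else
          (q, nn ++ List.replicate q.toNat max_sample_size)
      let nc' :=
        if i < (circuits.length : Int) then
          nc ++ List.replicate qnn.1.toNat (PySem.List.pyGetD circuits i 0)
        else nc
      pvAltGo circuits max_sample_size rest (nc', qnn.2, mu ++ [qnn.1])

def expand_sample_sizes_alt (circuits : List Int) (n_samples_per_circuit : List Int) (max_sample_size : Int) : List Int × List Int × List Int :=
  pvAltGo circuits max_sample_size (PySem.List.enumerate n_samples_per_circuit) ([], [], [])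

-- ===== PRECONDITION & SPEC =====
-- Pre_ excludes exactly the inputs where Python A raises ZeroDivisionError:
-- max_sample_size = 0 with at least one sample size to divide.
def Pre_expand_sample_sizes (circuits : List Int) (n_samples_per_circuit : List Int) (max_sample_size : Int) : Prop := max_sample_size ≠ 0 ∨ n_samples_per_circuit = []
instance (circuits : List Int) (n_samples_per_circuit : List Int) (max_sample_size : Int) : Decidable (Pre_expand_sample_sizes circuits n_samples_per_circuit max_sample_size) := by unfold Pre_expand_sample_sizes; infer_instance
def pvWitness_expand_sample_sizes : List Int × List Int × Int := ([10, 20], [5, 4], 2)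

def Spec_expand_sample_sizes (circuits : List Int) (n_samples_per_circuit : List Int) (max_sample_size : Int) (out : List Int × List Int × List Int) : Prop := out = expand_sample_sizes_alt circuits n_samples_per_circuit max_sample_size
instance (circuits : List Int) (n_samples_per_circuit : List Int) (max_sample_size : Int) (out : List Int × List Int × List Int) : Decidable (Spec_expand_sample_sizes circuits n_samples_per_circuit max_sample_size out) := by unfold Spec_expand_sample_sizes; infer_instance

-- ===== CLAIM (what is proved, stated in full; the proofs are below) =====
def Claim_equal_expand_sample_sizes : Prop := ∀ (circuits : List Int) (n_samples_per_circuit : List Int) (max_sample_size : Int), Dom_expand_sample_sizes circuits n_samples_per_circuit max_sample_size → Pre_expand_sample_sizes circuits n_samples_per_circuit max_sample_size → Spec_expand_sample_sizes circuits n_samples_per_circuit max_sample_size (expand_sample_sizes circuits n_samples_per_circuit max_sample_size)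

-- ===== LEMMAS AND PROOFS =====

-- ceil(n/m) = n//m + (0 or 1), first for positive divisors.
lemma pvCeil_eq_of_pos (n m : Int) (hm : 0 < m) :
    -(PySem.Int.floordiv (-n) m) =
      PySem.Int.floordiv n m + (if PySem.Int.mod n m = 0 then 0 else 1) := by
  have hmul := PySem.Int.floordiv_mul_add_mod n m
  have hr0 := PySem.Int.mod_nonneg n hm
  have hrlt := PySem.Int.mod_lt n hm
  rw [PySem.Int.neg_floordiv_neg_eq_iff_of_pos hm]
  split_ifs with h
  · constructor <;> nlinarith
  · have : 0 < PySem.Int.mod n m := lt_of_le_of_ne hr0 (Ne.symm h)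
    constructor <;> nlinarith

-- … and then for every nonzero divisor, by reduction to the positive case.
lemma pvCeil_eq (n m : Int) (hm : m ≠ 0) :
    -(PySem.Int.floordiv (-n) m) =
      PySem.Int.floordiv n m + (if PySem.Int.mod n m = 0 then 0 else 1) := by
  rcases lt_or_gt_of_ne hm with hneg | hpos
  · have h1 : PySem.Int.floordiv (-n) m = PySem.Int.floordiv n (-m) := by
      have := PySem.Int.floordiv_neg_neg n (-m); simpa using this
    have h2 : PySem.Int.floordiv n m = PySem.Int.floordiv (-n) (-m) := by
      have := PySem.Int.floordiv_neg_neg (-n) (-m); simpa using this.symm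
    have h3 : PySem.Int.mod n m = -PySem.Int.mod (-n) (-m) := by
      have := PySem.Int.mod_neg_neg (-n) (-m); simpa using this.symm
    have hkey := pvCeil_eq_of_pos (-n) (-m) (by omega)
    simp only [neg_neg] at hkey
    rw [h1, h2, h3]
    have hiff : (-PySem.Int.mod (-n) (-m) = 0) ↔ (PySem.Int.mod (-n) (-m) = 0) := by omega
    rw [if_congr hiff rfl rfl]
    exact hkey
  · exact pvCeil_eq_of_pos n m hpos

-- B's per-element step produces exactly A's helper multiplicity …
lemma pvStep_q (n m : Int) (hm : m ≠ 0) :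
    (if PySem.Int.mod n m ≠ 0 then PySem.Int.floordiv n m + 1 else PySem.Int.floordiv n m)
      = (pvExpandOne n m).2 := by
  have hceil := pvCeil_eq n m hm
  by_cases h : PySem.Int.mod n m = 0
  · rw [if_pos h, add_zero] at hceil
    simp [pvExpandOne, h, hceil]
  · rw [if_neg h] at hceil
    simp [pvExpandOne, h, hceil]

-- … and exactly A's helper chunk list.
lemma pvStep_chunks (n m : Int) (hm : m ≠ 0) :
    (if PySem.Int.mod n m ≠ 0 then
        List.replicate (PySem.Int.floordiv n m).toNat m ++ [PySem.Int.mod n m]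
      else List.replicate (PySem.Int.floordiv n m).toNat m)
      = (pvExpandOne n m).1 := by
  have hceil := pvCeil_eq n m hm
  by_cases h : PySem.Int.mod n m = 0
  · rw [if_pos h, add_zero] at hceil
    simp [pvExpandOne, h, ← hceil]
  · rw [if_neg h] at hceil
    simp [pvExpandOne, h, hceil]

-- the loop invariant: pvAltGo from index k appends A's three tails to the accumulators.
lemma pvAltGo_spec (C : List Int) (m : Int) (hm : m ≠ 0) :
    ∀ (ns : List Int) (k : Int), 0 ≤ k → ∀ (nc nn mu : List Int),
    pvAltGo C m (PySem.List.enumerate ns k) (nc, nn, mu) =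
      (nc ++ ((C.drop k.toNat).zip (ns.map (fun n => (pvExpandOne n m).2))).flatMap
               (fun p => List.replicate p.2.toNat p.1),
       nn ++ ns.flatMap (fun n => (pvExpandOne n m).1),
       mu ++ ns.map (fun n => (pvExpandOne n m).2)) := by
  intro ns
  induction ns with
  | nil => intro k hk nc nn mu; simp [pvAltGo, PySem.List.enumerate]
  | cons n ns ih =>
    intro k hk nc nn mu
    rw [PySem.List.enumerate_cons, pvAltGo]
    have hq := pvStep_q n m hm
    have hch := pvStep_chunks n m hm
    have hpair : (if PySem.Int.mod n m ≠ 0 then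
          (PySem.Int.floordiv n m + 1,
            nn ++ (List.replicate (PySem.Int.floordiv n m).toNat m ++ [PySem.Int.mod n m]))
        else
          (PySem.Int.floordiv n m, nn ++ List.replicate (PySem.Int.floordiv n m).toNat m))
        = ((pvExpandOne n m).2, nn ++ (pvExpandOne n m).1) := by
      by_cases h : PySem.Int.mod n m ≠ 0
      · rw [if_pos h]; rw [if_pos h] at hq hch; rw [hch, hq]
      · rw [if_neg h]; rw [if_neg h] at hq hch; rw [hch, hq]
    rw [hpair]
    rw [ih (k + 1) (by omega)]
    refine Prod.ext ?_ (Prod.ext ?_ ?_)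
    · -- circuits component
      by_cases hlt : k < (C.length : Int)
      · rw [if_pos hlt]
        have hklen : k.toNat < C.length := by omega
        have hsucc : (k + 1).toNat = k.toNat + 1 := by omega
        have hdrop : C.drop k.toNat = C[k.toNat] :: C.drop (k + 1).toNat := by
          rw [List.drop_eq_getElem_cons hklen, hsucc]
        rw [PySem.List.pyGetD_of_nonneg C 0 hk, List.getD_eq_getElem C 0 hklen, hdrop]
        simp [List.append_assoc]
      · rw [if_neg hlt]
        have h1 : C.drop k.toNat = [] := List.drop_eq_nil_of_le (by omega)
        have h2 : C.drop (k + 1).toNat = [] := List.drop_eq_nil_of_le (by omega)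
        simp [h1, h2]
    · simp [List.append_assoc]
    · simp [List.append_assoc]

-- ===== VERDICT (by name: the statement is the Claim_ definition above) =====
theorem expand_sample_sizes_spec : Claim_equal_expand_sample_sizes := by
  intro circuits ns m _hdom hpre
  rcases hpre with hm | hnil
  · unfold Spec_expand_sample_sizes expand_sample_sizes expand_sample_sizes_alt
    rw [show PySem.List.enumerate ns = PySem.List.enumerate ns 0 from rfl,
        pvAltGo_spec circuits m hm ns 0 le_rfl [] [] []]
    simp [List.flatMap_map, Function.comp_def]
  · subst hnil
    simp [Spec_expand_sample_sizes, expand_sample_sizes, expand_sample_sizes_alt,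
      pvAltGo, PySem.List.enumerate]
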